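-- pv_equiv track=rewrite | github.com/WEasterday/Local-Classroom-Attendance-Tracker | src/assets/CSV_READER.py | get_day
-- ===== SOURCE A (Python) =====
-- def get_day(course):
--     """Determine if the course belongs to A or B day (odd = A, even = B)."""
--     if not course:
--         return None
--     parts = course.split("-")
--     last = parts[-1]
--     digits = "".join([c for c in last if c.isdigit()])
--     if not digits:
--         return None
--     return "A" if int(digits) % 2 == 1 else "B"
-- ===== SOURCE B (Python) =====
-- def get_day(course):
--     """Determine if the course belongs to A or B day (odd = A, even = B)."""
--     if not course:
--         return None
--     last = course.split("-")[-1]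
--     # parity of int(all digits) is fixed by its units digit: scan for the last digit char
--     for c in reversed(last):
--         if c.isdigit():
--             return "A" if c in "13579" else "B"
--     return None
-- ===== Notes on version B (the rewrite author's own statement) =====
-- stated objective: simpler
-- what changed: Instead of collecting every digit character of the last hyphen-separated part, joining them and converting the whole string with int() before testing parity, B scans that part once in reverse and decides from the first (units-place) digit character it meets, since a number's parity is fixed by its last digit; the full number is never built.
import Mathlib
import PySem

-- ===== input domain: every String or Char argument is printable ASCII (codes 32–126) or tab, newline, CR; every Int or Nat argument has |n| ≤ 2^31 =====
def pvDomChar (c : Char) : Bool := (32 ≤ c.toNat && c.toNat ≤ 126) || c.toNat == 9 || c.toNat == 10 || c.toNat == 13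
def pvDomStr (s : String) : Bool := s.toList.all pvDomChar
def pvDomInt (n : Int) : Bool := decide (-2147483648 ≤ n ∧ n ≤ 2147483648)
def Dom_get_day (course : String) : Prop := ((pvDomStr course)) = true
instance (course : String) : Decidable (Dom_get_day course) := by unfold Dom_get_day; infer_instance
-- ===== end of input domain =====

-- B decides the day from the units-place digit of the last '-'-part alone (reverse scan for the
-- first digit char) instead of joining all digit chars and converting the whole string with int().

-- ===== PORT A =====
def get_day (course : String) : Option String :=
  -- if not course: return None
  if PySem.Str.len course = 0 then none
  else
    -- parts = course.split("-"); last = parts[-1]  (split on a nonempty sep; parts is never empty,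
    -- so the IndexError branch of [-1] is unreachable and mapped to none)
    match PySem.List.pyGet? (PySem.Chars.splitOn course.toList ['-']) (-1) with
    | none => none
    | some last =>
      -- digits = "".join([c for c in last if c.isdigit()])  (kept as the filtered char list)
      let digits := last.filter PySem.Chars.isdigit
      if digits = [] then none
      else
        -- int(digits): hand port, exact here because digits is a nonempty string of chars '0'..'9'
        -- (no sign, whitespace or '_'), so int() is the plain base-10 value of the digit sequence
        let n : Int := digits.foldl (fun a c => 10 * a + ((c.toNat : Int) - 48)) 0
        some (if PySem.Int.mod n 2 = 1 then "A" else "B")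

-- ===== PORT B =====
def get_day_alt (course : String) : Option String :=
  if PySem.Str.len course = 0 then none
  else
    match PySem.List.pyGet? (PySem.Chars.splitOn course.toList ['-']) (-1) with
    | none => none
    | some last =>
      -- for c in reversed(last): if c.isdigit(): return "A" if c in "13579" else "B"
      match last.reverse.find? PySem.Chars.isdigit with
      | some c => some (if PySem.Str.isIn (String.ofList [c]) "13579" then "A" else "B")
      | none => none

-- ===== PRECONDITION & SPEC =====
def Spec_get_day (course : String) (out : Option String) : Prop := out = get_day_alt course
instance (course : String) (out : Option String) : Decidable (Spec_get_day course out) := by unfold Spec_get_day; infer_instance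

-- ===== CLAIM (what is proved, stated in full; the proofs are below) =====
def Claim_equal_get_day : Prop := ∀ (course : String), Dom_get_day course → Spec_get_day course (get_day course)

-- ===== LEMMAS AND PROOFS =====

-- find? is the head of the filtered list
lemma pv_find?_eq_head?_filter {α : Type} (p : α → Bool) (l : List α) :
    l.find? p = (l.filter p).head? := by
  induction l with
  | nil => rfl
  | cons x xs ih =>
    cases h : p x
    · rw [List.find?_cons_of_neg (by simp [h]), List.filter_cons_of_neg (by simp [h]), ih]
    · rw [List.find?_cons_of_pos h, List.filter_cons_of_pos h, List.head?_cons]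

-- the reverse scan finds the LAST element of the filtered list
lemma pv_find?_reverse {α : Type} (p : α → Bool) (l : List α) :
    l.reverse.find? p = (l.filter p).getLast? := by
  rw [pv_find?_eq_head?_filter, List.filter_reverse, List.head?_reverse]

-- one-char membership in a string is plain list membership
lemma pv_isIn_singleton (c : Char) (l : List Char) :
    PySem.Chars.isIn [c] l = true ↔ c ∈ l := by
  rw [PySem.Chars.isIn_iff_infix]
  constructor
  · intro h
    exact h.mem (List.mem_singleton_self c)
  · intro h
    obtain ⟨s, t, rfl⟩ := List.append_of_mem h
    exact ⟨s, t, by simp⟩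

-- a digit char is odd iff it is one of '1','3','5','7','9'
lemma pv_odd_digit (c : Char) (h : PySem.Chars.isdigit c = true) :
    ((c.toNat : Int) - 48) % 2 = 1 ↔ c ∈ ['1', '3', '5', '7', '9'] := by
  have hb : 48 ≤ c.toNat ∧ c.toNat ≤ 57 := by
    simp only [PySem.Chars.isdigit, Bool.and_eq_true, decide_eq_true_eq, Char.le_def] at h
    exact ⟨h.1, h.2⟩
  constructor
  · intro hodd
    have hn : c.toNat = 49 ∨ c.toNat = 51 ∨ c.toNat = 53 ∨ c.toNat = 55 ∨ c.toNat = 57 := by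
      omega
    have hc := (Char.ofNat_toNat c).symm
    rcases hn with hn | hn | hn | hn | hn <;> rw [hn] at hc <;> subst hc <;> decide
  · intro hm
    simp only [List.mem_cons, List.not_mem_nil, or_false] at hm
    rcases hm with rfl | rfl | rfl | rfl | rfl <;> decide

-- the common tail: collect-all-digits-and-int versus reverse-scan-for-last-digit
lemma pv_tail_eq (L : List Char) :
    (let digits := L.filter PySem.Chars.isdigit
     if digits = [] then none
     else
       let n : Int := digits.foldl (fun a c => 10 * a + ((c.toNat : Int) - 48)) 0
       some (if PySem.Int.mod n 2 = 1 then "A" else "B"))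
    = (match L.reverse.find? PySem.Chars.isdigit with
       | some c => some (if PySem.Str.isIn (String.ofList [c]) "13579" then "A" else "B")
       | none => none) := by
  rw [pv_find?_reverse]
  rcases List.eq_nil_or_concat' (L.filter PySem.Chars.isdigit) with h | ⟨ds, c, h⟩
  · simp [h]
  · have hdig : PySem.Chars.isdigit c = true := by
      have hmem : c ∈ L.filter PySem.Chars.isdigit := by simp [h]
      exact (List.mem_filter.mp hmem).2
    have hmod : PySem.Int.mod ((ds ++ [c]).foldl (fun a c => 10 * a + ((c.toNat : Int) - 48)) 0) 2 = 1
        ↔ PySem.Str.isIn (String.ofList [c]) "13579" = true := by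
      rw [PySem.Int.mod_eq_emod_of_pos (by norm_num), List.foldl_append]
      have h1 : (List.foldl (fun a c => 10 * a + ((c.toNat : Int) - 48))
            (List.foldl (fun a c => 10 * a + ((c.toNat : Int) - 48)) 0 ds) [c]) % 2 = 1
          ↔ ((c.toNat : Int) - 48) % 2 = 1 := by
        simp only [List.foldl_cons, List.foldl_nil]
        omega
      rw [h1, pv_odd_digit c hdig,
        show PySem.Str.isIn (String.ofList [c]) "13579" = PySem.Chars.isIn [c] ['1','3','5','7','9'] from by simp,
        pv_isIn_singleton]
    rw [h]
    simp only [List.getLast?_concat, if_neg (by simp : ¬ (ds ++ [c] = []))]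
    by_cases hcase : PySem.Int.mod ((ds ++ [c]).foldl (fun a c => 10 * a + ((c.toNat : Int) - 48)) 0) 2 = 1
    · rw [if_pos hcase, if_pos (hmod.mp hcase)]
    · rw [if_neg hcase, if_neg (fun hb => hcase (hmod.mpr hb))]

-- ===== VERDICT (by name: the statement is the Claim_ definition above) =====
theorem get_day_spec : Claim_equal_get_day := by
  intro course _
  unfold Spec_get_day get_day get_day_alt
  by_cases hlen : PySem.Str.len course = 0
  · rw [if_pos hlen, if_pos hlen]
  · rw [if_neg hlen, if_neg hlen]
    cases h : PySem.List.pyGet? (PySem.Chars.splitOn course.toList ['-']) (-1) with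
    | none => rfl
    | some last => exact pv_tail_eq last
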